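-- pv_equiv track=rewrite | github.com/kadomagala/II-UWR | SI/Pracownia1/Zad4-Opt_dist/ai-kamil-domagala-1.4.py | opt_dist
-- ===== SOURCE A (Python) =====
-- def opt_dist(xs, D):
--     """
--     Idea is to generate all possible sequences of '1' with length D and XOR them with original list xs then number of
--     '1' in this output by the definition of XOR gives us number of needed changes, then we just take minimum.
--     """
--     min_swaps = len(xs)
--     sequence_of_ones = ['1' if i < D else '0' for i in range(0, len(xs))]
--
--     if D == 0:
--         return num_of_ones(xor_ls_of_chr(xs, sequence_of_ones))
--
--     while sequence_of_ones[len(sequence_of_ones) - 1] != '1':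
--         candidate_min = num_of_ones(xor_ls_of_chr(xs, sequence_of_ones))
--         min_swaps = min(min_swaps, candidate_min)
--         sequence_of_ones.pop()
--         sequence_of_ones.insert(0, '0')
--
--     candidate_min = num_of_ones(xor_ls_of_chr(xs, sequence_of_ones))
--     min_swaps = min(min_swaps, candidate_min)
--
--     return min_swaps
--
-- def xor_ls_of_chr(x1, x2):
--     """
--     XOR on two lists of chars {'0', '1'}
--     """
--     assert (len(x1) == len(x2))
--     return ['1' if x1[i] != x2[i] else '0' for i in range(0, len(x1))]
--
-- def num_of_ones(xs):
--     """
--     Count number of '1' in list xs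
--     """
--     n = 0
--     for x in xs:
--         if x == '1':
--             n += 1
--     return n
-- ===== SOURCE B (Python) =====
-- def opt_dist(xs, D):
--     # Prefix sums: O(n) instead of regenerating and XOR-ing a candidate list per shift.
--     n = len(xs)
--     if D <= 0:
--         return sum(1 for x in xs if x != '0')
--     if D >= n:
--         return sum(1 for x in xs if x != '1')
--     pa = [0]  # pa[k] = mismatches-against-'1' in xs[:k]
--     pb = [0]  # pb[k] = mismatches-against-'0' in xs[:k]
--     for x in xs:
--         pa.append(pa[-1] + (x != '1'))
--         pb.append(pb[-1] + (x != '0'))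
--     return min(pa[s + D] - pa[s] + pb[s] + pb[n] - pb[s + D]
--                for s in range(n - D + 1))
-- ===== Notes on version B (the rewrite author's own statement) =====
-- stated objective: faster
-- what changed: A regenerates the shifted ones-mask and XOR-counts all n positions for each of the ~n shifts; B builds two prefix-sum arrays of mismatch counts once and evaluates each shift with an O(1) formula.
import Mathlib
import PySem

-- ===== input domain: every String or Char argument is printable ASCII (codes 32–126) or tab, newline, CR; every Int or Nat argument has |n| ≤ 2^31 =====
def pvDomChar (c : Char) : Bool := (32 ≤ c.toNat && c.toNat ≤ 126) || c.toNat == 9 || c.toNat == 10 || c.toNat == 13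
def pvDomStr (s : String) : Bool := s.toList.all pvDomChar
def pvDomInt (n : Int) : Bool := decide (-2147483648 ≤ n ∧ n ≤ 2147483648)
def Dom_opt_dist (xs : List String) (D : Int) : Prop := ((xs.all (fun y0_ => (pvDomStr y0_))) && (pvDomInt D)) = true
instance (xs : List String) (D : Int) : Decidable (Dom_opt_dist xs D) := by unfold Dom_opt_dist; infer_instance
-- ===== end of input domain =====

-- B replaces A's per-shift mask regeneration + XOR count (O(n^2)) with two prefix-sum
-- arrays and an O(1) mismatch formula per shift (O(n)).

-- ===== PORT A =====
def num_of_ones (xs : List String) : Int :=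
  xs.foldl (fun n x => if x = "1" then n + 1 else n) 0

def xor_ls_of_chr (x1 x2 : List String) : List String :=
  (PySem.List.pyRange 0 x1.length 1).map
    (fun i => if PySem.List.pyGet? x1 i ≠ PySem.List.pyGet? x2 i then "1" else "0")

-- the while loop of A; fuel (len xs + 1) suffices on every input where the Python loop terminates
def optLoopA (fuel : Nat) (xs : List String) (min_swaps : Int) (seq : List String) :
    Int × List String :=
  match fuel with
  | 0 => (min_swaps, seq)
  | fuel + 1 =>
    if PySem.List.pyGet? seq ((seq.length : Int) - 1) ≠ some "1" then
      let candidate := num_of_ones (xor_ls_of_chr xs seq)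
      optLoopA fuel xs (min min_swaps candidate) ("0" :: seq.dropLast)
    else (min_swaps, seq)

def opt_dist (xs : List String) (D : Int) : Int :=
  let min_swaps : Int := xs.length
  let sequence_of_ones := (PySem.List.pyRange 0 xs.length 1).map
    (fun i => if i < D then "1" else "0")
  if D = 0 then num_of_ones (xor_ls_of_chr xs sequence_of_ones)
  else
    let r := optLoopA (xs.length + 1) xs min_swaps sequence_of_ones
    min r.1 (num_of_ones (xor_ls_of_chr xs r.2))

-- ===== PORT B =====
def opt_dist_alt (xs : List String) (D : Int) : Int :=
  let n : Int := xs.length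
  if D ≤ 0 then xs.foldl (fun acc x => if x ≠ "0" then acc + 1 else acc) 0
  else if n ≤ D then xs.foldl (fun acc x => if x ≠ "1" then acc + 1 else acc) 0
  else
    let pp := xs.foldl (fun (p : List Int × List Int) x =>
        (p.1 ++ [PySem.List.pyGetD p.1 (-1) 0 + (if x ≠ "1" then 1 else 0)],
         p.2 ++ [PySem.List.pyGetD p.2 (-1) 0 + (if x ≠ "0" then 1 else 0)])) ([0], [0])
    let cands := (PySem.List.pyRange 0 (n - D + 1) 1).map (fun s =>
        PySem.List.pyGetD pp.1 (s + D) 0 - PySem.List.pyGetD pp.1 s 0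
        + PySem.List.pyGetD pp.2 s 0 + PySem.List.pyGetD pp.2 n 0
        - PySem.List.pyGetD pp.2 (s + D) 0)
    (PySem.List.min? cands (fun v => v)).getD 0

-- ===== PRECONDITION & SPEC =====
-- Pre_ excludes exactly the inputs on which the Python A does not return: D < 0
-- (the shifting loop never terminates) and xs = [] with D ≠ 0 (IndexError on seq[-1]).
def Pre_opt_dist (xs : List String) (D : Int) : Prop := 0 ≤ D ∧ (xs = [] → D = 0)
instance (xs : List String) (D : Int) : Decidable (Pre_opt_dist xs D) := by
  unfold Pre_opt_dist; infer_instance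

def pvWitness_opt_dist : List String × Int := (["1", "0", "1", "1", "0"], 2)

def Spec_opt_dist (xs : List String) (D : Int) (out : Int) : Prop := out = opt_dist_alt xs D
instance (xs : List String) (D : Int) (out : Int) : Decidable (Spec_opt_dist xs D out) := by
  unfold Spec_opt_dist; infer_instance

-- ===== CLAIM (what is proved, stated in full; the proofs are below) =====
def Claim_equal_opt_dist : Prop := ∀ (xs : List String) (D : Int),
  Dom_opt_dist xs D → Pre_opt_dist xs D → Spec_opt_dist xs D (opt_dist xs D)

-- ===== LEMMAS AND PROOFS =====

def SA (l : List String) : Int := (l.countP (fun x => decide (x ≠ "1")) : Int)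
def SB (l : List String) : Int := (l.countP (fun x => decide (x ≠ "0")) : Int)
def cost (xs : List String) (d s : Nat) : Int :=
  SB (xs.take s) + SA ((xs.drop s).take d) + SB (xs.drop (s + d))
def seqR (s d t : Nat) : List String :=
  List.replicate s "0" ++ List.replicate d "1" ++ List.replicate t "0"
def amin (xs : List String) (d : Nat) (m : Int) (s k : Nat) : Int :=
  match k with
  | 0 => m
  | k + 1 => amin xs d (min m (cost xs d s)) (s + 1) k
theorem xor_eq_zipWith (x1 x2 : List String) (h : x1.length = x2.length) :
    xor_ls_of_chr x1 x2 = List.zipWith (fun a b => if a ≠ b then "1" else "0") x1 x2 := by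
  unfold xor_ls_of_chr
  rw [show ((x1.length : Int)) = ((x1.length : Nat) : Int) by simp, PySem.List.pyRange_zero_nat,
    List.map_map]
  apply List.ext_getElem
  · simp [h]
  · intro i h1 h2
    simp only [List.length_map, List.length_range] at h1
    simp only [List.getElem_map, List.getElem_range, Function.comp, List.getElem_zipWith]
    rw [PySem.List.pyGet?_natCast, PySem.List.pyGet?_natCast,
      List.getElem?_eq_getElem h1, List.getElem?_eq_getElem (h ▸ h1)]
    simp

theorem zipWith_replicate_right (f : String → String → String) (c : String) :
    ∀ (l : List String), List.zipWith f l (List.replicate l.length c) = l.map (fun a => f a c) := by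
  intro l; induction l with
  | nil => rfl
  | cons a t ih => simp [List.replicate_succ, ih]


theorem xor_cost_parts (P M S : List String) :
    num_of_ones (xor_ls_of_chr (P ++ (M ++ S)) (seqR P.length M.length S.length))
      = SB P + SA M + SB S := by
  rw [xor_eq_zipWith _ _ (by simp [seqR])]
  rw [seqR, List.append_assoc]
  rw [List.zipWith_append (by simp), List.zipWith_append (by simp)]
  rw [zipWith_replicate_right, zipWith_replicate_right, zipWith_replicate_right]
  unfold num_of_ones
  rw [List.foldl_append, List.foldl_append]
  rw [PySem.List.foldl_ite_add_one (fun x => x = "1"),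
      PySem.List.foldl_ite_add_one (fun x => x = "1"),
      PySem.List.foldl_ite_add_one (fun x => x = "1")]
  simp only [List.countP_map]
  unfold SA SB
  have e0 : ∀ (l : List String), List.countP ((fun x => decide (x = "1")) ∘ (fun a => if a ≠ "0" then "1" else "0")) l = List.countP (fun x => decide (x ≠ "0")) l := by
    intro l; apply List.countP_congr; intro a _
    by_cases ha : a = "0" <;> simp [ha]
  have e1 : List.countP ((fun x => decide (x = "1")) ∘ (fun a => if a ≠ "1" then "1" else "0")) M = List.countP (fun x => decide (x ≠ "1")) M := by
    apply List.countP_congr; intro a _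
    by_cases ha : a = "1" <;> simp [ha]
  rw [e0, e0, e1]
  ring

theorem xor_cost (xs : List String) (s d t : Nat) (h : xs.length = s + d + t) :
    num_of_ones (xor_ls_of_chr xs (seqR s d t))
      = SB (xs.take s) + SA ((xs.drop s).take d) + SB (xs.drop (s + d)) := by
  have hx : xs = xs.take s ++ ((xs.drop s).take d ++ xs.drop (s + d)) := by
    rw [← List.drop_drop, List.take_append_drop, List.take_append_drop]
  have l1 : (xs.take s).length = s := by rw [List.length_take]; omega
  have l2 : ((xs.drop s).take d).length = d := by
    rw [List.length_take, List.length_drop]; omega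
  have l3 : (xs.drop (s + d)).length = t := by rw [List.length_drop]; omega
  calc num_of_ones (xor_ls_of_chr xs (seqR s d t))
      = num_of_ones (xor_ls_of_chr (xs.take s ++ ((xs.drop s).take d ++ xs.drop (s + d)))
          (seqR (xs.take s).length ((xs.drop s).take d).length (xs.drop (s + d)).length)) := by
        rw [l1, l2, l3, ← hx]
    _ = SB (xs.take s) + SA ((xs.drop s).take d) + SB (xs.drop (s + d)) :=
        xor_cost_parts _ _ _

theorem shift_seqR (s d k : Nat) :
    "0" :: (seqR s d (k + 1)).dropLast = seqR (s + 1) d k := by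
  have h : seqR s d (k+1) = (seqR s d k) ++ ["0"] := by
    simp [seqR, List.replicate_succ' (n := k)]
  rw [h, List.dropLast_concat]
  simp [seqR, List.replicate_succ]
theorem last_seqR_zero (s d k : Nat) :
    PySem.List.pyGet? (seqR s d (k + 1)) (((seqR s d (k + 1)).length : Int) - 1) = some "0" := by
  have h : seqR s d (k+1) = (seqR s d k) ++ "0" :: [] := by
    simp [seqR, List.replicate_succ' (n := k)]
  rw [h]
  rw [show (((seqR s d k ++ "0" :: []).length : Int) - 1) = ((seqR s d k).length : Int) by
    simp]
  exact PySem.List.pyGet?_append_length _ _ _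

theorem last_seqR_one (s d : Nat) (hd : 1 ≤ d) :
    PySem.List.pyGet? (seqR s d 0) (((seqR s d 0).length : Int) - 1) = some "1" := by
  obtain ⟨d', rfl⟩ : ∃ d', d = d' + 1 := ⟨d - 1, by omega⟩
  have h : seqR s (d' + 1) 0 = (List.replicate s "0" ++ List.replicate d' "1") ++ "1" :: [] := by
    simp [seqR, List.replicate_succ' (n := d')]
  rw [h]
  rw [show (((List.replicate s "0" ++ List.replicate d' "1" ++ "1" :: []).length : Int) - 1)
      = ((List.replicate s "0" ++ List.replicate d' "1").length : Int) by simp; omega]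
  exact PySem.List.pyGet?_append_length _ _ _

theorem loopA_spec (xs : List String) (d : Nat) (hd : 1 ≤ d) :
    ∀ (k s : Nat) (f : Nat) (m : Int), s + d + k = xs.length →
      optLoopA (k + f + 1) xs m (seqR s d k) = (amin xs d m s k, seqR (s + k) d 0) := by
  intro k
  induction k with
  | zero =>
    intro s f m h
    show optLoopA (0 + f + 1) xs m (seqR s d 0) = _
    rw [show 0 + f + 1 = f + 1 by omega]
    unfold optLoopA
    rw [if_neg (by rw [last_seqR_one s d hd]; simp)]
    rfl
  | succ k ih =>
    intro s f m h
    rw [show k + 1 + f + 1 = (k + (f + 1)) + 1 by omega]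
    unfold optLoopA
    rw [if_pos (by rw [last_seqR_zero]; simp)]
    simp only
    rw [shift_seqR]
    rw [show k + (f + 1) = k + f + 1 by omega, ih (s+1) f _ (by omega)]
    have hc : num_of_ones (xor_ls_of_chr xs (seqR s d (k + 1))) = cost xs d s := by
      rw [xor_cost xs s d (k+1) (by omega)]; rfl
    rw [hc]
    rw [show s + 1 + k = s + (k + 1) by omega]
    rfl

theorem cost_le (xs : List String) (d s : Nat) (h : s + d ≤ xs.length) :
    cost xs d s ≤ (xs.length : Int) := by
  unfold cost SA SB
  have h1 := List.countP_le_length (l := xs.take s) (p := fun x => decide (x ≠ "0"))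
  have h2 := List.countP_le_length (l := (xs.drop s).take d) (p := fun x => decide (x ≠ "1"))
  have h3 := List.countP_le_length (l := xs.drop (s + d)) (p := fun x => decide (x ≠ "0"))
  simp only [List.length_take, List.length_drop] at h1 h2 h3
  omega

theorem amin_eq_foldl (xs : List String) (d : Nat) :
    ∀ (k s : Nat) (m : Int),
      amin xs d m s k = List.foldl min m ((List.range k).map (fun j => cost xs d (s + j))) := by
  intro k
  induction k with
  | zero => intro s m; rfl
  | succ k ih =>
    intro s m
    show amin xs d (min m (cost xs d s)) (s + 1) k = _
    rw [ih]
    rw [List.range_succ_eq_map, List.map_cons, List.foldl_cons, List.map_map]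
    congr 1
    apply List.map_congr_left
    intro j _
    simp only [Function.comp_apply]
    congr 1
    omega

theorem pref_foldl (xs : List String) :
    xs.foldl (fun (p : List Int × List Int) x =>
        (p.1 ++ [PySem.List.pyGetD p.1 (-1) 0 + (if x ≠ "1" then 1 else 0)],
         p.2 ++ [PySem.List.pyGetD p.2 (-1) 0 + (if x ≠ "0" then 1 else 0)])) ([0], [0])
      = ((List.range (xs.length + 1)).map (fun j => SA (xs.take j)),
         (List.range (xs.length + 1)).map (fun j => SB (xs.take j))) := by
  induction xs using List.reverseRecOn with
  | nil => simp [SA, SB]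
  | append_singleton l x ih =>
    rw [List.foldl_append, ih, List.foldl_cons, List.foldl_nil]
    have hsplit : ∀ (g : Nat → Int) (n : Nat), (List.range (n + 1)).map g
        = (List.range n).map g ++ [g n] := by
      intro g n; rw [List.range_succ, List.map_append]; rfl
    have comp : ∀ (F : List String → Int) (c : String → Int),
        (∀ (t : List String) (y : String), F (t ++ [y]) = F t + c y) →
        (List.range (l.length+1)).map (fun j => F (l.take j)) ++
          [PySem.List.pyGetD ((List.range (l.length+1)).map (fun j => F (l.take j))) (-1) 0 + c x]
        = (List.range ((l ++ [x]).length+1)).map (fun j => F ((l ++ [x]).take j)) := by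
      intro F c hF
      rw [List.length_append, List.length_singleton]
      rw [hsplit (fun j => F ((l ++ [x]).take j)) (l.length + 1)]
      congr 1
      · apply List.map_congr_left
        intro j hj
        simp only [List.mem_range] at hj
        rw [List.take_append_of_le_length (by omega)]
      · rw [hsplit (fun j => F (l.take j)) l.length,
          PySem.List.pyGetD_neg_one_append_singleton]
        simp only [List.take_length]
        rw [List.take_of_length_le (by simp), hF]
    exact congrArg₂ Prod.mk
      (comp SA (fun y => if y ≠ "1" then 1 else 0) (by
        intro t y; unfold SA
        rw [List.countP_append]
        by_cases hy : y = "1" <;> simp [hy]))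
      (comp SB (fun y => if y ≠ "0" then 1 else 0) (by
        intro t y; unfold SB
        rw [List.countP_append]
        by_cases hy : y = "0" <;> simp [hy]))


-- B's simple branches
theorem init_seq_eq_seqR (xs : List String) (D : Int) (hD : 0 ≤ D) :
    (PySem.List.pyRange 0 xs.length 1).map (fun i => if i < D then "1" else "0")
      = seqR 0 (min D.toNat xs.length) (xs.length - min D.toNat xs.length) := by
  rw [show ((xs.length : Int)) = ((xs.length : Nat) : Int) by simp, PySem.List.pyRange_zero_nat,
    List.map_map]
  apply List.ext_getElem
  · simp [seqR]
  · intro i h1 h2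
    simp only [List.length_map, List.length_range] at h1
    simp only [List.getElem_map, List.getElem_range, Function.comp]
    simp only [seqR, List.getElem_append, List.length_replicate,
      List.getElem_replicate, List.replicate_zero, List.nil_append]
    have hiD : ((i : Int) < D) ↔ (i < min D.toNat xs.length) := by omega
    split_ifs <;> first | rfl | omega

theorem foldl_ne0 (xs : List String) :
    xs.foldl (fun acc x => if x ≠ "0" then acc + 1 else acc) 0 = SB xs := by
  rw [PySem.List.foldl_ite_add_one (fun x => x ≠ "0")]
  unfold SB; ring

theorem foldl_ne1 (xs : List String) :
    xs.foldl (fun acc x => if x ≠ "1" then acc + 1 else acc) 0 = SA xs := by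
  rw [PySem.List.foldl_ite_add_one (fun x => x ≠ "1")]
  unfold SA; ring

theorem SA_le (l : List String) : SA l ≤ (l.length : Int) := by
  unfold SA
  exact_mod_cast List.countP_le_length

theorem main (xs : List String) (D : Int) (hD : 0 ≤ D) (hne : xs = [] → D = 0) :
    opt_dist xs D = opt_dist_alt xs D := by
  by_cases h0 : D = 0
  · subst h0
    unfold opt_dist opt_dist_alt
    rw [if_pos rfl, if_pos le_rfl]
    rw [init_seq_eq_seqR xs 0 le_rfl]
    simp only [Int.toNat_zero, Nat.zero_min, Nat.sub_zero]
    rw [xor_cost xs 0 0 xs.length (by omega), foldl_ne0]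
    simp [SA, SB]
  · have hDpos : 0 < D := lt_of_le_of_ne hD (Ne.symm h0)
    have hxs : xs ≠ [] := fun h => h0 (hne h)
    have hn1 : 1 ≤ xs.length := List.length_pos_iff.mpr hxs
    by_cases hbig : (xs.length : Int) ≤ D
    · -- block covers everything: answer = SA xs
      have hmin : min D.toNat xs.length = xs.length := by omega
      unfold opt_dist opt_dist_alt
      rw [if_neg h0, if_neg (by omega), if_pos hbig]
      rw [init_seq_eq_seqR xs D hD, hmin, Nat.sub_self]
      show min (optLoopA (xs.length + 1) xs (xs.length : Int) (seqR 0 xs.length 0)).1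
          (num_of_ones (xor_ls_of_chr xs
            (optLoopA (xs.length + 1) xs (xs.length : Int) (seqR 0 xs.length 0)).2)) = _
      rw [show xs.length + 1 = 0 + xs.length + 1 by omega]
      rw [loopA_spec xs xs.length (by omega) 0 0 xs.length (xs.length : Int) (by omega)]
      simp only [amin, Nat.add_zero]
      rw [xor_cost xs 0 xs.length 0 (by omega)]
      rw [foldl_ne1]
      have : SB (xs.take 0) + SA ((xs.drop 0).take xs.length) + SB (xs.drop (0 + xs.length))
          = SA xs := by
        simp [SA, SB, List.take_of_length_le (le_refl xs.length)]
      rw [this]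
      exact min_eq_right (SA_le xs)
    · -- main case: 1 ≤ d := D.toNat < n
      set n := xs.length with hn
      set d := D.toNat with hdd
      have hd1 : 1 ≤ d := by omega
      have hdn : d < n := by omega
      set k := n - d with hk
      have hkd : k + d = n := by omega
      -- A's side
      have hA : opt_dist xs D
          = min (amin xs d (n : Int) 0 k) (cost xs d k) := by
        unfold opt_dist
        rw [if_neg h0]
        show min (optLoopA (n + 1) xs (n : Int)
            ((PySem.List.pyRange 0 (n:Int) 1).map (fun i => if i < D then "1" else "0"))).1
          (num_of_ones (xor_ls_of_chr xs (optLoopA (n + 1) xs (n : Int)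
            ((PySem.List.pyRange 0 (n:Int) 1).map (fun i => if i < D then "1" else "0"))).2)) = _
        rw [init_seq_eq_seqR xs D hD]
        rw [show min D.toNat n = d by omega, show n - d = k from rfl]
        rw [show n + 1 = k + d + 1 by omega]
        rw [loopA_spec xs d hd1 k 0 d (n : Int) (by omega)]
        rw [show (0 + k) = k by omega]
        rw [xor_cost xs k d 0 (by omega)]
        rfl
      -- both sides equal the same fold of minima
      have hfold : ∀ (m : Int) (L : List Int) (x : Int),
          min (List.foldl min m L) x = List.foldl min m (L ++ [x]) := by
        intro m L x; rw [List.foldl_append]; rfl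
      have hA2 : opt_dist xs D
          = List.foldl min (cost xs d 0) ((List.range k).map (fun j => cost xs d (j + 1))) := by
        rw [hA, amin_eq_foldl, hfold]
        simp only [Nat.zero_add]
        have hjoin : (List.range k).map (fun j => cost xs d j) ++ [cost xs d k]
            = (List.range (k + 1)).map (fun j => cost xs d j) := by
          rw [List.range_succ, List.map_append]; rfl
        rw [hjoin, List.range_succ_eq_map, List.map_cons, List.foldl_cons, List.map_map,
          min_eq_right (cost_le xs d 0 (by omega))]
        simp only [Function.comp_def, Nat.succ_eq_add_one]
      -- B's side
      have hB : opt_dist_alt xs D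
          = List.foldl min (cost xs d 0) ((List.range k).map (fun j => cost xs d (j + 1))) := by
        unfold opt_dist_alt
        rw [if_neg (by omega), if_neg (by omega)]
        rw [pref_foldl]
        rw [show ((n : Int) - D + 1) = (((k + 1 : Nat)) : Int) by omega]
        rw [PySem.List.pyRange_zero_nat]
        simp only [List.map_map]
        have hcand : ∀ j ∈ List.range (k + 1),
            (PySem.List.pyGetD ((List.range (n + 1)).map (fun j => SA (xs.take j))) ((j : Int) + D) 0
              - PySem.List.pyGetD ((List.range (n + 1)).map (fun j => SA (xs.take j))) (j : Int) 0
              + PySem.List.pyGetD ((List.range (n + 1)).map (fun j => SB (xs.take j))) (j : Int) 0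
              + PySem.List.pyGetD ((List.range (n + 1)).map (fun j => SB (xs.take j))) (n : Int) 0
              - PySem.List.pyGetD ((List.range (n + 1)).map (fun j => SB (xs.take j))) ((j : Int) + D) 0)
            = cost xs d j := by
          intro j hj
          simp only [List.mem_range] at hj
          rw [show ((j : Int) + D) = (((j + d : Nat)) : Int) by omega]
          rw [PySem.List.pyGetD_natCast, PySem.List.pyGetD_natCast, PySem.List.pyGetD_natCast,
            PySem.List.pyGetD_natCast, PySem.List.pyGetD_natCast]
          rw [PySem.List.getD_map_range _ _ _ _ (by omega),
            PySem.List.getD_map_range _ _ _ _ (by omega),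
            PySem.List.getD_map_range _ _ _ _ (by omega),
            PySem.List.getD_map_range _ _ _ _ (by omega),
            PySem.List.getD_map_range _ _ _ _ (by omega)]
          have e1 : SA (xs.take (j + d)) = SA (xs.take j) + SA ((xs.drop j).take d) := by
            unfold SA; rw [List.take_add, List.countP_append]; push_cast; ring
          have e2 : xs.take n = xs := List.take_length
          have e3 : SB xs = SB (xs.take (j + d)) + SB (xs.drop (j + d)) := by
            unfold SB
            conv_lhs => rw [← List.take_append_drop (j + d) xs]
            rw [List.countP_append]; push_cast; ring
          rw [e1, e2, e3]
          unfold cost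
          ring
        rw [List.map_congr_left (l := List.range (k + 1)) (g := fun j => cost xs d j)
          (fun j hj => by
            simp only [Function.comp_apply]
            exact hcand j hj)]
        rw [List.range_succ_eq_map, List.map_cons]
        rw [PySem.List.min?_id_cons, Option.getD_some, List.map_map]
        simp only [Function.comp_def, Nat.succ_eq_add_one]
      rw [hA2, hB]

-- ===== VERDICT (by name: the statement is the Claim_ definition above) =====
theorem opt_dist_spec : Claim_equal_opt_dist := by
  intro xs D _ hpre
  unfold Spec_opt_dist
  exact main xs D hpre.1 hpre.2
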